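-- pv_equiv track=rewrite | github.com/ShibamRoy9826/KawaiiPet | main.py | selectUp
-- ===== SOURCE A (Python) =====
-- def selectUp(btnArr):
--     newArr=[0]*len(btnArr)
--     for ind,i in enumerate(btnArr):
--         if i==1:
--             if ind==0:
--                 newArr[0]=1
--             else:
--                 newArr[ind-1]=1
--     return newArr
-- ===== SOURCE B (Python) =====
-- def selectUp(btnArr):
--     n = len(btnArr)
--     return [1 if ((j + 1 < n and btnArr[j + 1] == 1) or (j == 0 and btnArr[0] == 1)) else 0
--             for j in range(n)]
-- ===== Notes on version B (the rewrite author's own statement) =====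
-- stated objective: simpler
-- what changed: Replaced the index-writing loop (zero array then set newArr[ind-1] per input 1) by a single output-driven comprehension that reads btnArr[j+1] (or btnArr[0] at j=0) for each output position.
import Mathlib
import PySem

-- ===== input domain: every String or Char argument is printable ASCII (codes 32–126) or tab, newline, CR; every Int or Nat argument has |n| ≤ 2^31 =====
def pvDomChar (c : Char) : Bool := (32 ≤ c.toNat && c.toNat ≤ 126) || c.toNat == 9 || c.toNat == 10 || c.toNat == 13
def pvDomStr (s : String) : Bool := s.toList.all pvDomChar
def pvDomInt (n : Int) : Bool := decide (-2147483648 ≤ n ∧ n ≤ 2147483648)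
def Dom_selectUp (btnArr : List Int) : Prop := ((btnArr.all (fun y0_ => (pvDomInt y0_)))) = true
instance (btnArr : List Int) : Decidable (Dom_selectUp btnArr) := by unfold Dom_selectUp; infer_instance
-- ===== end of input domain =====

-- B replaces A's index-writing loop by an output-driven comprehension; objective: simpler.


-- ===== PORT A =====
def selectUp (btnArr : List Int) : List Int :=
  (PySem.List.enumerate btnArr).foldl
    (fun newArr p =>
      if p.2 = 1 then
        if p.1 = 0 then PySem.List.pySetD newArr 0 1
        else PySem.List.pySetD newArr (p.1 - 1) 1
      else newArr)
    (List.replicate btnArr.length (0 : Int))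

-- ===== PORT B =====
def selectUp_alt (btnArr : List Int) : List Int :=
  (PySem.List.pyRange 0 (PySem.List.len btnArr) 1).map (fun j =>
    if ((j + 1 < PySem.List.len btnArr ∧ PySem.List.pyGetD btnArr (j + 1) 0 = 1) ∨
        (j = 0 ∧ PySem.List.pyGetD btnArr 0 0 = 1)) then (1 : Int) else 0)

-- ===== PRECONDITION & SPEC =====
def Spec_selectUp (btnArr : List Int) (out : List Int) : Prop := out = selectUp_alt btnArr
instance (btnArr : List Int) (out : List Int) : Decidable (Spec_selectUp btnArr out) := by unfold Spec_selectUp; infer_instance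

-- ===== CLAIM (what is proved, stated in full; the proofs are below) =====
def Claim_equal_selectUp : Prop := ∀ (btnArr : List Int), Dom_selectUp btnArr → Spec_selectUp btnArr (selectUp btnArr)

-- ===== LEMMAS AND PROOFS =====

-- The loop step of port A, named for the lemmas (definitionally the lambda in selectUp).
def pvStep (newArr : List Int) (p : Int × Int) : List Int :=
  if p.2 = 1 then
    if p.1 = 0 then PySem.List.pySetD newArr 0 1
    else PySem.List.pySetD newArr (p.1 - 1) 1
  else newArr

theorem pvStep_eq : (fun (newArr : List Int) (p : Int × Int) =>
    if p.2 = 1 then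
      if p.1 = 0 then PySem.List.pySetD newArr 0 1
      else PySem.List.pySetD newArr (p.1 - 1) 1
    else newArr) = pvStep := rfl

-- target index of a write triggered at position m
def pvTgt (m : Nat) : Nat := if m = 0 then 0 else m - 1

theorem pvTgt_le (m : Nat) : pvTgt m ≤ m := by unfold pvTgt; split <;> omega

theorem pvStep_char (arr : List Int) (s : Int) (x : Int) (hs : 0 ≤ s) :
    pvStep arr (s, x) = if x = 1 then arr.set (pvTgt s.toNat) 1 else arr := by
  unfold pvStep
  by_cases hx : x = 1
  case neg => simp [hx]
  simp only [hx]
  by_cases h0 : s = 0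
  · subst h0
    rw [if_pos rfl, PySem.List.pySetD_of_nonneg arr 1 (le_refl 0)]
    simp [pvTgt]
  · have h1 : (0:Int) ≤ s - 1 := by omega
    rw [if_neg h0, PySem.List.pySetD_of_nonneg arr 1 h1]
    have h2 : pvTgt s.toNat = (s - 1).toNat := by unfold pvTgt; split <;> omega
    rw [h2]

-- a cell already holding 1 keeps holding 1 (every write writes 1)
theorem pvKeep (xs : List Int) : ∀ (s : Int) (arr : List Int) (k : Nat), 0 ≤ s →
    arr[k]? = some 1 →
    ((PySem.List.enumerate xs s).foldl pvStep arr)[k]? = some 1 := by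
  induction xs with
  | nil => intro s arr k _ h; simpa [PySem.List.enumerate] using h
  | cons x xs ih =>
    intro s arr k hs h
    rw [PySem.List.enumerate_cons, List.foldl_cons]
    refine ih (s+1) _ k (by omega) ?_
    rw [pvStep_char arr s x hs]
    by_cases hx : x = 1
    case neg => simpa [hx] using h
    rw [if_pos hx, List.getElem?_set]
    split
    · rename_i heq
      rw [heq, if_pos (List.getElem?_eq_some_iff.mp h).1]
    · exact h

-- a triggered write makes the final cell 1
theorem pvHit (xs : List Int) : ∀ (s : Int) (arr : List Int) (i k : Nat), 0 ≤ s →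
    s.toNat + xs.length ≤ arr.length →
    xs[i]? = some 1 → pvTgt (s.toNat + i) = k →
    ((PySem.List.enumerate xs s).foldl pvStep arr)[k]? = some 1 := by
  induction xs with
  | nil => intro s arr i k _ _ h; simp at h
  | cons x xs ih =>
    intro s arr i k hs hlen hi hk
    rw [PySem.List.enumerate_cons, List.foldl_cons, pvStep_char arr s x hs]
    cases i with
    | zero =>
      simp at hi
      subst hi
      simp only [Nat.add_zero] at hk
      refine pvKeep xs (s+1) _ k (by omega) ?_
      rw [if_pos rfl, List.getElem?_set]
      have hklt : k < arr.length := by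
        have := pvTgt_le s.toNat
        simp at hlen; omega
      simp [hk, hklt]
    | succ i' =>
      refine ih (s+1) _ i' k (by omega) ?_ (by simpa using hi) ?_
      · simp at hlen ⊢
        by_cases hx : x = 1 <;> simp [hx] <;> omega
      · have : (s+1).toNat + i' = s.toNat + (i' + 1) := by omega
        rw [this]; exact hk
    
-- a cell no write targets keeps its initial value
theorem pvMiss (xs : List Int) : ∀ (s : Int) (arr : List Int) (k : Nat), 0 ≤ s →
    (∀ i : Nat, xs[i]? = some 1 → pvTgt (s.toNat + i) ≠ k) →
    ((PySem.List.enumerate xs s).foldl pvStep arr)[k]? = arr[k]? := by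
  induction xs with
  | nil => intro s arr k _ _; simp [PySem.List.enumerate]
  | cons x xs ih =>
    intro s arr k hs hno
    rw [PySem.List.enumerate_cons, List.foldl_cons, pvStep_char arr s x hs]
    have step : (if x = 1 then arr.set (pvTgt s.toNat) 1 else arr)[k]? = arr[k]? := by
      by_cases hx : x = 1 <;> simp [hx]
      rw [List.getElem?_set]
      have := hno 0 (by simp [hx])
      simp at this
      simp [this]
    rw [ih (s+1) _ k (by omega) ?_, step]
    intro i hi
    have : (s+1).toNat + i = s.toNat + (i + 1) := by omega
    rw [this]
    exact hno (i+1) (by simpa using hi)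

-- ===== VERDICT (by name: the statement is the Claim_ definition above) =====
theorem selectUp_spec : Claim_equal_selectUp := by
  intro btnArr _
  show selectUp btnArr = selectUp_alt btnArr
  unfold selectUp selectUp_alt
  rw [pvStep_eq]
  apply List.ext_getElem?
  intro k
  have hlenB : ((PySem.List.pyRange 0 (PySem.List.len btnArr) 1).map (fun j =>
      if ((j + 1 < PySem.List.len btnArr ∧ PySem.List.pyGetD btnArr (j + 1) 0 = 1) ∨
        (j = 0 ∧ PySem.List.pyGetD btnArr 0 0 = 1)) then (1 : Int) else 0)).length = btnArr.length := by
    simp [PySem.List.length_pyRange_one, PySem.List.len]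
  by_cases hk : k < btnArr.length
  · -- B's value at k
    have hB := PySem.List.getElem?_map_pyRange_zero (f := fun j =>
      if ((j + 1 < PySem.List.len btnArr ∧ PySem.List.pyGetD btnArr (j + 1) 0 = 1) ∨
        (j = 0 ∧ PySem.List.pyGetD btnArr 0 0 = 1)) then (1 : Int) else 0)
      (n := btnArr.length) (k := k) hk
    rw [show ((btnArr.length : Int)) = PySem.List.len btnArr from by simp [PySem.List.len]] at hB
    rw [hB]
    by_cases hc : ((k : Int) + 1 < PySem.List.len btnArr ∧ PySem.List.pyGetD btnArr ((k : Int) + 1) 0 = 1) ∨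
        ((k : Int) = 0 ∧ PySem.List.pyGetD btnArr 0 0 = 1)
    · -- some write targets k
      simp only [if_pos hc]
      rcases hc with ⟨h1, h2⟩ | ⟨h1, h2⟩
      · refine pvHit btnArr 0 _ (k+1) k (le_refl _) (by simp) ?_ (by simp [pvTgt])
        have hlt : k + 1 < btnArr.length := by simp [PySem.List.len] at h1; omega
        rw [show ((k : Int) + 1) = ((k+1 : Nat) : Int) from by push_cast; ring] at h2
        rw [PySem.List.pyGetD_natCast] at h2
        simp [List.getD, List.getElem?_eq_getElem hlt] at h2 ⊢
        omega
      · have hk0 : k = 0 := by omega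
        subst hk0
        refine pvHit btnArr 0 _ 0 0 (le_refl _) (by simp) ?_ (by simp [pvTgt])
        rw [show ((0:Int)) = ((0 : Nat) : Int) from rfl, PySem.List.pyGetD_natCast] at h2
        have h0lt : 0 < btnArr.length := by omega
        simp [List.getD, List.getElem?_eq_getElem h0lt] at h2 ⊢
        omega
    · -- no write targets k
      simp only [if_neg hc]
      rw [pvMiss btnArr 0 _ k (le_refl _) ?_]
      · simp [hk]
      · intro i hi htgt
        apply hc
        simp only [Int.toNat_zero, Nat.zero_add] at htgt
        have hilt : i < btnArr.length := (List.getElem?_eq_some_iff.mp hi).1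
        have hival : btnArr[i] = 1 := (List.getElem?_eq_some_iff.mp hi).2
        unfold pvTgt at htgt
        by_cases hi0 : i = 0
        · right
          subst hi0
          simp at htgt
          subst htgt
          constructor
          · rfl
          · rw [show ((0:Int)) = ((0 : Nat) : Int) from rfl, PySem.List.pyGetD_natCast]
            simp [List.getD, List.getElem?_eq_getElem hilt, hival]
        · left
          rw [if_neg hi0] at htgt
          have hik : i = k + 1 := by omega
          subst hik
          constructor
          · simp [PySem.List.len]; omega
          · rw [show ((k : Int) + 1) = ((k+1 : Nat) : Int) from by push_cast; ring,
              PySem.List.pyGetD_natCast]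
            simp [List.getD, List.getElem?_eq_getElem hilt, hival]
  · -- k out of range on both sides
    rw [pvMiss btnArr 0 _ k (le_refl _) ?_]
    · rw [List.getElem?_eq_none (by simp; omega), List.getElem?_eq_none (by rw [hlenB]; omega)]
    · intro i hi
      have h1 : i < btnArr.length := (List.getElem?_eq_some_iff.mp hi).1
      have h2 := pvTgt_le (Int.toNat 0 + i)
      omega
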